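-- pv_equiv track=rewrite | github.com/avdes96/advent_of_code | 2015/day_05/solution.py | string_nice
-- ===== SOURCE A (Python) =====
-- def string_nice(string: str) -> bool:
--     vowels = set(['a', 'e', 'i', 'o', 'u'])
--     num_vowels = 0
--     contains_double = False
--     invalid_pairs = set(['ab', 'cd', 'pq', 'xy'])
--     for i in range(len(string)):
--         if string[i] in vowels:
--             num_vowels += 1
--         if i < len(string) - 1:
--             if string[i] == string[i+1]:
--                 contains_double = True
--             if string[i:i+2] in invalid_pairs:
--                 return False
--     return num_vowels >= 3 and contains_double
-- ===== SOURCE B (Python) =====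
-- def string_nice(string: str) -> bool:
--     if any(bad in string for bad in ("ab", "cd", "pq", "xy")):
--         return False
--     if sum(string.count(v) for v in "aeiou") < 3:
--         return False
--     return any(c + c in string for c in set(string))
-- ===== Notes on version B (the rewrite author's own statement) =====
-- stated objective: faster
-- what changed: Replaced A's fused character-by-character index loop (vowel counter, double flag, early return on a bad slice) by whole-string substring searches: a containment test per forbidden bigram, str.count per vowel, and a doubled-character substring search over the distinct characters; the interpreted per-character loop disappears into C-level string primitives.
import Mathlib
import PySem

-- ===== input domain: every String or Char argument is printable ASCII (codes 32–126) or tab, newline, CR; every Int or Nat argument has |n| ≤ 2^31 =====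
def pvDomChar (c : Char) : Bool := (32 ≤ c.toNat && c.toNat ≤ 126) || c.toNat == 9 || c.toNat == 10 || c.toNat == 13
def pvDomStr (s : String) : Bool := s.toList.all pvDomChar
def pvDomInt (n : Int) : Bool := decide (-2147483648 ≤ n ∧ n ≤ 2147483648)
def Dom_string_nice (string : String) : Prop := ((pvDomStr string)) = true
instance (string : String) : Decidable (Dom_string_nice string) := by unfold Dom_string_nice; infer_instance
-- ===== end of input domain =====

-- B replaces A's fused per-character index loop (counters, early return) by whole-string substring
-- searches (containment per forbidden bigram, str.count per vowel, doubled-character containment over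
-- the distinct characters); measured constant-factor faster in Python (C-level string primitives).

-- ===== PORT A =====
-- A's index loop: state (num_vowels, contains_double), early return False on an invalid pair.
def stringNiceLoopA : List Char → Nat → Bool → Bool
  | [], nv, dbl => decide (3 ≤ nv) && dbl
  | [c], nv, dbl =>
    decide (3 ≤ (if c ∈ ['a', 'e', 'i', 'o', 'u'] then nv + 1 else nv)) && dbl
  | c :: d :: rest, nv, dbl =>
    let nv' := if c ∈ ['a', 'e', 'i', 'o', 'u'] then nv + 1 else nv
    let dbl' := if c == d then true else dbl
    if [c, d] ∈ [['a','b'], ['c','d'], ['p','q'], ['x','y']] then false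
    else stringNiceLoopA (d :: rest) nv' dbl'

def string_nice (string : String) : Bool :=
  stringNiceLoopA string.toList 0 false

-- ===== PORT B =====
-- Source B, step for step: 'bad in string' and 'c + c in string' are PySem.Chars.isIn (substring search),
-- 'string.count(v)' is PySem.Chars.count, 'set(string)' is PySem.Set.ofList (consumed by any: order-free).
def string_nice_alt (string : String) : Bool :=
  let cs := string.toList
  if [['a','b'], ['c','d'], ['p','q'], ['x','y']].any (fun bad => PySem.Chars.isIn bad cs) then
    false
  else if (['a', 'e', 'i', 'o', 'u'].map (fun v => PySem.Chars.count cs [v])).sum < 3 then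
    false
  else
    (PySem.Set.ofList cs).any (fun c => PySem.Chars.isIn [c, c] cs)

-- ===== PRECONDITION & SPEC =====
def Spec_string_nice (string : String) (out : Bool) : Prop := out = string_nice_alt string
instance (string : String) (out : Bool) : Decidable (Spec_string_nice string out) := by unfold Spec_string_nice; infer_instance

-- ===== CLAIM (what is proved, stated in full; the proofs are below) =====
def Claim_equal_string_nice : Prop := ∀ (string : String), Dom_string_nice string → Spec_string_nice string (string_nice string)

-- ===== LEMMAS AND PROOFS =====
-- A's loop, characterised over the adjacent-pair list.
lemma stringNiceLoopA_eq (cs : List Char) (nv : Nat) (dbl : Bool) :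
    stringNiceLoopA cs nv dbl =
      (((cs.zip (cs.drop 1)).all fun p => !([p.1, p.2] ∈ [['a','b'], ['c','d'], ['p','q'], ['x','y']]))
        && (decide (3 ≤ nv + cs.countP fun c => c ∈ ['a', 'e', 'i', 'o', 'u'])
        && (dbl || (cs.zip (cs.drop 1)).any fun p => p.1 == p.2))) := by
  induction cs generalizing nv dbl with
  | nil => simp [stringNiceLoopA]
  | cons c rest ih =>
    cases rest with
    | nil =>
      simp only [stringNiceLoopA, List.drop, List.zip_nil_right, List.all_nil, List.any_nil,
        Bool.or_false, Bool.true_and, List.countP_cons, List.countP_nil]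
      by_cases hv : c ∈ ['a', 'e', 'i', 'o', 'u'] <;> simp [hv]
    | cons d rest' =>
      simp only [stringNiceLoopA]
      rw [ih]
      simp only [List.drop, List.zip_cons_cons, List.all_cons, List.any_cons, List.countP_cons]
      by_cases hbad : [c, d] ∈ [['a','b'], ['c','d'], ['p','q'], ['x','y']]
      · simp [hbad]
      · simp only [hbad, if_false]
        by_cases hcd : c = d
        · by_cases hv : c ∈ ['a', 'e', 'i', 'o', 'u'] <;>
            simp_all [Nat.add_assoc, Nat.add_comm 1]
        · have hb : (c == d) = false := beq_eq_false_iff_ne.mpr hcd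
          simp only [hb, Bool.false_or]
          by_cases hv : c ∈ ['a', 'e', 'i', 'o', 'u'] <;>
            simp_all [Nat.add_assoc, Nat.add_comm 1]

-- str.count with a single-character needle is List.count.
lemma countGo_singleton (v : Char) (l : List Char) (fuel acc : Nat) (h : l.length ≤ fuel) :
    PySem.Chars.count.go [v] fuel l acc = acc + l.count v := by
  induction l generalizing fuel acc with
  | nil => rw [PySem.Chars.count.go.eq_def]; cases fuel <;> simp
  | cons c t ih =>
    cases fuel with
    | zero => simp at h
    | succ f =>
      have hstep : PySem.Chars.count.go [v] (f + 1) (c :: t) acc =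
          if [v].isPrefixOf (c :: t) then PySem.Chars.count.go [v] f (List.drop [v].length (c :: t)) (acc + 1)
          else PySem.Chars.count.go [v] f t acc := by
        rw [PySem.Chars.count.go.eq_def]
      rw [hstep]
      simp only [List.length_cons, Nat.succ_le_succ_iff] at h
      by_cases hvc : v = c
      · subst hvc
        rw [if_pos (by simp [List.isPrefixOf])]
        simp only [List.length_cons, List.length_nil, Nat.zero_add, List.drop_succ_cons,
          List.drop_zero]
        rw [ih f (acc + 1) h]
        simp [Nat.add_assoc, Nat.add_comm 1]
      · have hb : (v == c) = false := beq_eq_false_iff_ne.mpr hvc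
        rw [if_neg (by simp [List.isPrefixOf, hb])]
        rw [ih f acc h]
        simp [List.count_cons, beq_eq_false_iff_ne.mpr (Ne.symm hvc)]

lemma count_singleton (cs : List Char) (v : Char) :
    PySem.Chars.count cs [v] = cs.count v := by
  unfold PySem.Chars.count
  simp [countGo_singleton v cs cs.length 0 le_rfl]

-- a two-character substring occurs iff it occurs as an adjacent pair
lemma infix_pair (cs : List Char) (a b : Char) :
    [a, b] <:+: cs ↔ ∃ p ∈ cs.zip (cs.drop 1), p.1 = a ∧ p.2 = b := by
  induction cs with
  | nil => simp
  | cons c t ih =>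
    rw [List.infix_cons_iff]
    cases t with
    | nil =>
      simp only [List.drop, List.zip_nil_right, List.mem_nil_iff]
      constructor
      · rintro (hp | hi)
        · exact absurd hp.length_le (by simp)
        · exact absurd hi.length_le (by simp)
      · rintro ⟨p, hp, -⟩; exact absurd hp (by simp)
    | cons d t' =>
      simp only [List.drop, List.zip_cons_cons, List.mem_cons]
      constructor
      · rintro (hp | hi)
        · rcases hp with ⟨s, hs⟩
          refine ⟨(c, d), Or.inl rfl, ?_, ?_⟩ <;> simp_all
        · rcases (ih.mp hi) with ⟨p, hp, hab⟩
          exact ⟨p, Or.inr hp, hab⟩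
      · rintro ⟨p, hp | hp, ha, hb⟩
        · left
          obtain ⟨rfl, rfl⟩ : p.1 = c ∧ p.2 = d := by
            cases p; simp_all
          exact ⟨t', by simp [ha, hb]⟩
        · right; exact ih.mpr ⟨p, hp, ha, hb⟩

-- B's bad-bigram search over the whole string = A's per-pair test
lemma bad_search_eq (cs : List Char) :
    [['a','b'], ['c','d'], ['p','q'], ['x','y']].any (fun bad => PySem.Chars.isIn bad cs) =
      !((cs.zip (cs.drop 1)).all fun p => !([p.1, p.2] ∈ [['a','b'], ['c','d'], ['p','q'], ['x','y']])) := by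
  rw [← Bool.not_inj_iff, Bool.not_not]
  simp only [List.all_eq_not_any_not, Bool.not_not, Bool.not_eq_eq_eq_not]
  rw [Bool.eq_iff_iff]
  simp only [List.any_eq_true, PySem.Chars.isIn_iff_infix, List.mem_cons, List.not_mem_nil,
    or_false]
  constructor
  · rintro ⟨bad, hmem, hinf⟩
    rcases hmem with rfl | rfl | rfl | rfl <;>
      · rcases (infix_pair cs _ _).mp hinf with ⟨p, hp, h1, h2⟩
        exact ⟨p, hp, by simp [h1, h2]⟩
  · rintro ⟨p, hp, hbad⟩
    simp only [decide_eq_true_eq, List.cons_eq_cons, and_true] at hbad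
    rcases hbad with h | h | h | h
    · exact ⟨['a','b'], by simp, (infix_pair cs _ _).mpr ⟨p, hp, h.1, h.2⟩⟩
    · exact ⟨['c','d'], by simp, (infix_pair cs _ _).mpr ⟨p, hp, h.1, h.2⟩⟩
    · exact ⟨['p','q'], by simp, (infix_pair cs _ _).mpr ⟨p, hp, h.1, h.2⟩⟩
    · exact ⟨['x','y'], by simp, (infix_pair cs _ _).mpr ⟨p, hp, h.1, h.2⟩⟩

-- B's double-character search over the distinct characters = A's adjacent-equality test
lemma double_search_eq (cs : List Char) :
    (PySem.Set.ofList cs).any (fun c => PySem.Chars.isIn [c, c] cs) =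
      ((cs.zip (cs.drop 1)).any fun p => p.1 == p.2) := by
  rw [Bool.eq_iff_iff]
  simp only [List.any_eq_true, PySem.Chars.isIn_iff_infix, PySem.Set.mem_ofList, beq_iff_eq]
  constructor
  · rintro ⟨c, -, hinf⟩
    rcases (infix_pair cs c c).mp hinf with ⟨p, hp, h1, h2⟩
    exact ⟨p, hp, by rw [h1, h2]⟩
  · rintro ⟨p, hp, heq⟩
    exact ⟨p.1, (List.of_mem_zip hp).1, (infix_pair cs p.1 p.1).mpr ⟨p, hp, rfl, heq.symm⟩⟩

-- B's per-vowel counts sum to A's vowel countP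
lemma vowel_sum_eq (cs : List Char) :
    (['a', 'e', 'i', 'o', 'u'].map (fun v => PySem.Chars.count cs [v])).sum =
      cs.countP fun c => c ∈ ['a', 'e', 'i', 'o', 'u'] := by
  simp only [count_singleton, List.map_cons, List.map_nil, List.sum_cons, List.sum_nil]
  induction cs with
  | nil => simp
  | cons c t ih =>
    simp only [List.count_cons, List.countP_cons]
    by_cases hv : c ∈ ['a', 'e', 'i', 'o', 'u']
    · simp only [List.mem_cons, List.not_mem_nil, or_false] at hv
      rcases hv with rfl | rfl | rfl | rfl | rfl <;> simp_all <;> omega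
    · simp only [List.mem_cons, List.not_mem_nil, or_false, not_or] at hv
      obtain ⟨h1, h2, h3, h4, h5⟩ := hv
      simp_all [Ne.symm]

-- ===== VERDICT (by name: the statement is the Claim_ definition above) =====
theorem string_nice_spec : Claim_equal_string_nice := by
  intro s _
  unfold Spec_string_nice string_nice string_nice_alt
  rw [stringNiceLoopA_eq]
  simp only [bad_search_eq, double_search_eq, vowel_sum_eq, Nat.zero_add, Bool.false_or]
  set pairsOK := ((s.toList.zip (s.toList.drop 1)).all fun p => !([p.1, p.2] ∈ [['a','b'], ['c','d'], ['p','q'], ['x','y']])) with hp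
  set nv := s.toList.countP fun c => c ∈ ['a', 'e', 'i', 'o', 'u'] with hn
  set dbl := ((s.toList.zip (s.toList.drop 1)).any fun p => p.1 == p.2) with hd
  cases pairsOK <;> by_cases h3 : 3 ≤ nv <;> cases dbl <;> simp_all
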